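-- pv_equiv track=rewrite | github.com/DaltonCole/ProgramingProblems | facebook_hacker_cup/2021/qual/a1/letters.py | sub_solution
-- ===== SOURCE A (Python) =====
-- vowels = set(['A', 'E', 'I', 'O', 'U'])
--
-- MAX_VALUE = 9999999
--
-- def sub_solution(letters: dict, num_vowels: int, num_const: int) -> int:
--     best = MAX_VALUE
--     for current_letter, num_letter in letters.items():
--         num_letter = letters[current_letter]
--
--         if current_letter in vowels:
--             cost = (2 * (num_vowels - num_letter)) + num_const
--         else:
--             cost = (2 * (num_const - num_letter)) + num_vowels
--
--         best = min(best, cost)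
--
--     return best
-- ===== SOURCE B (Python) =====
-- vowels = set(['A', 'E', 'I', 'O', 'U'])
--
-- MAX_VALUE = 9999999
--
-- def sub_solution(letters: dict, num_vowels: int, num_const: int) -> int:
--     # One pass: track the largest count seen in each category, then build
--     # at most two candidate costs from those maxima.
--     max_vowel = None
--     max_const = None
--     for letter, cnt in letters.items():
--         if letter in vowels:
--             max_vowel = cnt if max_vowel is None else max(max_vowel, cnt)
--         else:
--             max_const = cnt if max_const is None else max(max_const, cnt)
--     best = MAX_VALUE
--     if max_vowel is not None:
--         best = min(best, 2 * num_vowels + num_const - 2 * max_vowel)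
--     if max_const is not None:
--         best = min(best, 2 * num_const + num_vowels - 2 * max_const)
--     return best
-- ===== Notes on version B (the rewrite author's own statement) =====
-- stated objective: alternative
-- what changed: Instead of computing a cost for every letter and folding a running min, B tracks only the maximum count per category (vowel/consonant) in one pass and derives at most two candidate costs from those maxima at the end.
import Mathlib
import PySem

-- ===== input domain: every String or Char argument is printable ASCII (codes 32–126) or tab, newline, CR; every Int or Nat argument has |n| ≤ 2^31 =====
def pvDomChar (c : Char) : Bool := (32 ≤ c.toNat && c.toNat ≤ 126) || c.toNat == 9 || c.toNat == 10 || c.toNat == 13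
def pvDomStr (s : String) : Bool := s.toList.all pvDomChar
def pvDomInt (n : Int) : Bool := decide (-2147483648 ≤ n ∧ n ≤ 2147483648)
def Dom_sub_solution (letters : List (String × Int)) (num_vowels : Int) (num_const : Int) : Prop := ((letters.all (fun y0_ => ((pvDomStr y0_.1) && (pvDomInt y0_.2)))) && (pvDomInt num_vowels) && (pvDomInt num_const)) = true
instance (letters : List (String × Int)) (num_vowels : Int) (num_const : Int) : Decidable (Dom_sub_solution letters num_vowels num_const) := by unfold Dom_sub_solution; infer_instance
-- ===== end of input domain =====

-- B replaces A's per-letter running min by tracking the maximum count per category and building at most two candidate costs at the end (alternative decomposition, same cost).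


-- the module-level 'vowels' set
def pvVowels : List String := ["A", "E", "I", "O", "U"]

-- ===== PORT A =====
def sub_solution (letters : List (String × Int)) (num_vowels : Int) (num_const : Int) : Int :=
  let d := PySem.Dict.ofList letters
  d.items.foldl (fun best p =>
    -- num_letter = letters[current_letter]; the key comes from d.items so it is
    -- always present and the default 0 is never used (Python never raises here)
    let num_letter := d.getD p.1 0
    let cost := if pvVowels.contains p.1 then 2 * (num_vowels - num_letter) + num_const
                else 2 * (num_const - num_letter) + num_vowels
    min best cost) 9999999

-- ===== PORT B =====
-- one step of B's loop: update the per-category maxima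
def pvStepB (acc : Option Int × Option Int) (p : String × Int) : Option Int × Option Int :=
  if pvVowels.contains p.1 then
    (some (match acc.1 with | none => p.2 | some v => max v p.2), acc.2)
  else
    (acc.1, some (match acc.2 with | none => p.2 | some c => max c p.2))

-- B's epilogue: fold the (at most two) candidate costs into MAX_VALUE
def pvFinish (num_vowels num_const : Int) (s : Option Int × Option Int) : Int :=
  let b1 : Int := match s.1 with
    | none => 9999999
    | some v => min 9999999 (2 * num_vowels + num_const - 2 * v)
  match s.2 with
  | none => b1
  | some c => min b1 (2 * num_const + num_vowels - 2 * c)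

def sub_solution_alt (letters : List (String × Int)) (num_vowels : Int) (num_const : Int) : Int :=
  let d := PySem.Dict.ofList letters
  pvFinish num_vowels num_const (d.items.foldl pvStepB (none, none))

-- ===== PRECONDITION & SPEC =====
def Spec_sub_solution (letters : List (String × Int)) (num_vowels : Int) (num_const : Int) (out : Int) : Prop := out = sub_solution_alt letters num_vowels num_const
instance (letters : List (String × Int)) (num_vowels : Int) (num_const : Int) (out : Int) : Decidable (Spec_sub_solution letters num_vowels num_const out) := by unfold Spec_sub_solution; infer_instance

-- ===== CLAIM (what is proved, stated in full; the proofs are below) =====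
def Claim_equal_sub_solution : Prop := ∀ (letters : List (String × Int)) (num_vowels : Int) (num_const : Int), Dom_sub_solution letters num_vowels num_const → Spec_sub_solution letters num_vowels num_const (sub_solution letters num_vowels num_const)

-- ===== LEMMAS AND PROOFS =====

-- A's loop step, with the (provably redundant) dict lookup replaced by the iterated value
def pvStepA' (num_vowels num_const : Int) (best : Int) (p : String × Int) : Int :=
  min best (if pvVowels.contains p.1 then 2 * (num_vowels - p.2) + num_const
            else 2 * (num_const - p.2) + num_vowels)

lemma pvFinish_step (nv nc : Int) (s : Option Int × Option Int) (p : String × Int) :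
    pvFinish nv nc (pvStepB s p) = pvStepA' nv nc (pvFinish nv nc s) p := by
  obtain ⟨mv, mc⟩ := s
  by_cases h : p.1 ∈ pvVowels <;>
    cases mv <;> cases mc <;> simp [pvFinish, pvStepB, pvStepA', h] <;> omega

lemma pvFinish_foldl (nv nc : Int) (l : List (String × Int)) (s : Option Int × Option Int) :
    pvFinish nv nc (l.foldl pvStepB s) = l.foldl (pvStepA' nv nc) (pvFinish nv nc s) := by
  induction l generalizing s with
  | nil => rfl
  | cons p t ih => simp only [List.foldl_cons, ih, pvFinish_step]

-- ===== VERDICT (by name: the statement is the Claim_ definition above) =====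
theorem sub_solution_spec : Claim_equal_sub_solution := by
  intro letters nv nc _
  unfold Spec_sub_solution sub_solution sub_solution_alt
  rw [pvFinish_foldl]
  apply PySem.List.foldl_congr_mem
  intro best p hp
  have hp' : (p.1, p.2) ∈ (PySem.Dict.ofList letters).items := by simpa using hp
  have hget : (PySem.Dict.ofList letters).getD p.1 0 = p.2 :=
    PySem.Dict.getD_of_mem_items (PySem.Dict.ofList letters) hp'
      (PySem.Dict.nodup_keys_ofList letters) 0
  simp [pvStepA', hget]
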